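-- pv_equiv track=rewrite | github.com/nguyenthienhy/InverstNormalization | postProcessing.py | combineSeparatedNumber
-- ===== SOURCE A (Python) =====
-- def combineSeparatedNumber(text):
--     words = text.split()
--     start_end_list = []
--     flags = [False for _ in words]
--     for index, word in enumerate(words):
--         if word.isdecimal() and len(word) == 1 and flags[index] is False:
--             index_decimal = index
--             index_start = index_decimal
--             start_end = []
--             while words[index_decimal].isdecimal() and len(words[index_decimal]) == 1:
--                 flags[index_decimal] = True
--                 start_end.append(words[index_decimal])
--                 index_decimal += 1
--                 if index_decimal >= len(words):
--                     break
--             index_end = index_decimal - 1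
--             separatedNumber = " ".join(words[index_start:index_end+1])
--             combineNumber = "".join(words[index_start:index_end+1])
--             text = text.replace(separatedNumber, combineNumber)
--             start_end_list.append(start_end)
--             if index_decimal == len(words):
--                 break
--     return " ".join(text.split())
-- ===== SOURCE B (Python) =====
-- def combineSeparatedNumber(text):
--     # Single state-machine fold over the words: accumulate the current run of
--     # single-char decimal words; on each run close, replace it in the text.
--     def flush(s, run):
--         return s.replace(" ".join(run), "".join(run)) if run else s
--     out = text
--     run = []
--     for w in text.split():
--         if len(w) == 1 and w.isdecimal():
--             run.append(w)
--         else: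
--             out = flush(out, run)
--             run = []
--     out = flush(out, run)
--     return " ".join(out.split())
-- ===== Notes on version B (the rewrite author's own statement) =====
-- stated objective: simpler
-- what changed: B discards A's flags array, enumerate loop and inner run-scanning while: a single state-machine fold over the words accumulates the current run of single-char decimal words and replaces it in the text the moment the run closes (or at the final flush), then normalizes whitespace.
import Mathlib
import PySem

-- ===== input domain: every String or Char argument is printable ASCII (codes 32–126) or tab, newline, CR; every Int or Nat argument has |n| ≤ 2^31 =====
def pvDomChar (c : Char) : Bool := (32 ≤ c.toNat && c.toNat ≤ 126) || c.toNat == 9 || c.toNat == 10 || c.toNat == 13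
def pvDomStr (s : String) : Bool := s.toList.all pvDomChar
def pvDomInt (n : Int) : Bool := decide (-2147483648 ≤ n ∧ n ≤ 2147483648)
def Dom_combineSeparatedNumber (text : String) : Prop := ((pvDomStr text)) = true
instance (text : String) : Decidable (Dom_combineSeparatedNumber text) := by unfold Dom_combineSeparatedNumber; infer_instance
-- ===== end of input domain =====

-- B replaces A's flags array, enumerate loop and inner while by a single state-machine
-- fold over the words that accumulates the current run and replaces it when it closes
-- (objective: simpler).


-- ===== PORT A =====
-- word.isdecimal() and len(word) == 1  (str.isdecimal coincides with str.isdigit on ASCII, which Dom_ guarantees)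
def pvIsSD (w : String) : Bool := PySem.Str.strIsdigit w && (PySem.Str.len w == 1)

-- A's inner 'while' loop: the bound check before the read is Python's post-increment
-- 'if index_decimal >= len(words): break' (the first entry is always in range).
-- The loops below recurse structurally on a fuel argument that is always ≥ the remaining
-- indices (words.length - i), so the fuel guard never fires before the loop's own exit test.
def pvRunWhileAGo (words : List String) : Nat → Nat → List Bool → List String → Nat × List Bool × List String
  | 0, i, flags, acc => (i, flags, acc)
  | fuel + 1, i, flags, acc =>
    if i < words.length ∧ pvIsSD (words.getD i "") then
      pvRunWhileAGo words fuel (i + 1) (flags.set i true) (acc ++ [words.getD i ""])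
    else (i, flags, acc)

def pvRunWhileA (words : List String) (i : Nat) (flags : List Bool) (acc : List String) :
    Nat × List Bool × List String :=
  pvRunWhileAGo words (words.length - i) i flags acc

-- A's outer 'for index, word in enumerate(words)' with the flags array, the in-loop
-- text.replace, the start_end_list accumulator and the final break.
def pvLoopAGo (words : List String) : Nat → Nat → List Bool → String → List (List String) → String
  | 0, _, _, text, _ => text
  | fuel + 1, index, flags, text, sel =>
    if index < words.length then
      if pvIsSD (words.getD index "") && !(flags.getD index false) then
        let r := pvRunWhileA words index flags []
        let idxDec := r.1
        let flags' := r.2.1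
        let startEnd := r.2.2
        let indexEnd := idxDec - 1
        let piece := PySem.List.slice words (some (index : Int)) (some ((indexEnd + 1 : Nat) : Int))
        let sep := PySem.Str.join " " piece
        let comb := PySem.Str.join "" piece
        let text' := PySem.Str.replace text sep comb
        let sel' := sel ++ [startEnd]
        if idxDec = words.length then text'
        else pvLoopAGo words fuel (index + 1) flags' text' sel'
      else pvLoopAGo words fuel (index + 1) flags text sel
    else text

def pvLoopA (words : List String) (index : Nat) (flags : List Bool)
    (text : String) (sel : List (List String)) : String :=
  pvLoopAGo words (words.length - index) index flags text sel

def combineSeparatedNumber (text : String) : String :=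
  let words := PySem.Str.split₀ text
  let flags := words.map (fun _ => false)
  let t := pvLoopA words 0 flags text []
  PySem.Str.join " " (PySem.Str.split₀ t)

-- ===== PORT B =====
-- Source B's 'flush': replace the closed run in the text (no-op on an empty run)
def pvRepl (s : String) (run : List String) : String :=
  if run.isEmpty then s
  else PySem.Str.replace s (PySem.Str.join " " run) (PySem.Str.join "" run)

-- the body of Source B's single for-loop, as the step of a fold over (out, run)
def pvBStep (st : String × List String) (w : String) : String × List String :=
  if pvIsSD w then (st.1, st.2 ++ [w]) else (pvRepl st.1 st.2, [])

def combineSeparatedNumber_alt (text : String) : String :=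
  let st := (PySem.Str.split₀ text).foldl pvBStep (text, [])
  PySem.Str.join " " (PySem.Str.split₀ (pvRepl st.1 st.2))

-- ===== PRECONDITION & SPEC =====
def Spec_combineSeparatedNumber (text : String) (out : String) : Prop := out = combineSeparatedNumber_alt text
instance (text : String) (out : String) : Decidable (Spec_combineSeparatedNumber text out) := by unfold Spec_combineSeparatedNumber; infer_instance

-- ===== CLAIM (what is proved, stated in full; the proofs are below) =====
def Claim_equal_combineSeparatedNumber : Prop := ∀ (text : String), Dom_combineSeparatedNumber text → Spec_combineSeparatedNumber text (combineSeparatedNumber text)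

-- ===== LEMMAS AND PROOFS =====

-- proof-only helpers: the index after the run starting at j, and B's fold-then-flush
def pvScanEndGo (words : List String) : Nat → Nat → Nat
  | 0, j => j
  | fuel + 1, j =>
    if j < words.length ∧ pvIsSD (words.getD j "") then pvScanEndGo words fuel (j + 1) else j

def pvScanEnd (words : List String) (j : Nat) : Nat :=
  pvScanEndGo words (words.length - j) j

def pvBRun (ws : List String) (s : String) : String :=
  let st := ws.foldl pvBStep (s, []); pvRepl st.1 st.2

theorem pvScanEndGo_irrel (words : List String) :
    ∀ f1 f2 j, words.length - j ≤ f1 → words.length - j ≤ f2 →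
    pvScanEndGo words f1 j = pvScanEndGo words f2 j := by
  intro f1
  induction f1 with
  | zero =>
    intro f2 j h1 h2
    cases f2 with
    | zero => rfl
    | succ f2 =>
      rw [pvScanEndGo, pvScanEndGo, if_neg (by omega)]
  | succ f1 ih =>
    intro f2 j h1 h2
    by_cases hc : j < words.length ∧ pvIsSD (words.getD j "") = true
    · cases f2 with
      | zero => omega
      | succ f2 =>
        rw [pvScanEndGo, pvScanEndGo, if_pos hc, if_pos hc]
        exact ih f2 (j + 1) (by omega) (by omega)
    · cases f2 with
      | zero => rw [pvScanEndGo, pvScanEndGo, if_neg hc]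
      | succ f2 => rw [pvScanEndGo, pvScanEndGo, if_neg hc, if_neg hc]

theorem pvScanEnd_eq (words : List String) (j : Nat) :
    pvScanEnd words j =
      if j < words.length ∧ pvIsSD (words.getD j "") then pvScanEnd words (j + 1) else j := by
  unfold pvScanEnd
  by_cases hc : j < words.length ∧ pvIsSD (words.getD j "") = true
  · rw [if_pos hc]
    have h1 : words.length - j = (words.length - j - 1) + 1 := by omega
    rw [h1, pvScanEndGo, if_pos hc]
    exact pvScanEndGo_irrel words (words.length - j - 1) (words.length - (j + 1)) (j + 1)
      (by omega) (by omega)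
  · rw [if_neg hc]
    cases hn : words.length - j with
    | zero => rfl
    | succ f => rw [pvScanEndGo, if_neg hc]

theorem pvScanEnd_ge (words : List String) (j : Nat) : j ≤ pvScanEnd words j := by
  unfold pvScanEnd
  generalize words.length - j = f
  induction f generalizing j with
  | zero => rw [pvScanEndGo]
  | succ f ih =>
    rw [pvScanEndGo]
    split_ifs with hc
    · exact Nat.le_trans (by omega) (ih (j + 1))
    · omega

theorem pvScanEnd_gt (words : List String) (i : Nat)
    (h1 : i < words.length) (h2 : pvIsSD (words.getD i "") = true) : i < pvScanEnd words i := by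
  rw [pvScanEnd_eq, if_pos ⟨h1, h2⟩]
  have := pvScanEnd_ge words (i + 1)
  omega

theorem pvScanEnd_le (words : List String) (j : Nat) (h : j ≤ words.length) :
    pvScanEnd words j ≤ words.length := by
  unfold pvScanEnd
  generalize hf : words.length - j = f
  induction f generalizing j with
  | zero => rw [pvScanEndGo]; omega
  | succ f ih =>
    rw [pvScanEndGo]
    split_ifs with hc
    · exact ih (j + 1) (by omega) (by omega)
    · exact h

theorem pvScanEnd_dig (words : List String) (i : Nat) :
    ∀ k, i ≤ k → k < pvScanEnd words i → pvIsSD (words.getD k "") = true := by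
  unfold pvScanEnd
  generalize hf : words.length - i = f
  induction f generalizing i with
  | zero =>
    rw [pvScanEndGo]
    intro k h1 h2
    omega
  | succ f ih =>
    rw [pvScanEndGo]
    split_ifs with hc
    · intro k hk1 hk2
      rcases Nat.eq_or_lt_of_le hk1 with rfl | hk
      · exact hc.2
      · exact ih (i + 1) (by omega) k hk hk2
    · intro k h1 h2
      omega

-- at the index pvScanEnd returns, the loop condition fails
theorem pvScanEnd_stop (words : List String) (j : Nat) :
    ¬ (pvScanEnd words j < words.length ∧ pvIsSD (words.getD (pvScanEnd words j) "") = true) := by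
  unfold pvScanEnd
  generalize hf : words.length - j = f
  induction f generalizing j with
  | zero =>
    rw [pvScanEndGo]
    intro h
    omega
  | succ f ih =>
    rw [pvScanEndGo]
    split_ifs with hc
    · exact ih (j + 1) (by omega)
    · exact hc

theorem pvRunWhileAGo_irrel (words : List String) :
    ∀ f1 f2 i flags acc, words.length - i ≤ f1 → words.length - i ≤ f2 →
    pvRunWhileAGo words f1 i flags acc = pvRunWhileAGo words f2 i flags acc := by
  intro f1
  induction f1 with
  | zero =>
    intro f2 i flags acc h1 h2
    cases f2 with
    | zero => rfl
    | succ f2 => rw [pvRunWhileAGo, pvRunWhileAGo, if_neg (by omega)]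
  | succ f1 ih =>
    intro f2 i flags acc h1 h2
    by_cases hc : i < words.length ∧ pvIsSD (words.getD i "") = true
    · cases f2 with
      | zero => omega
      | succ f2 =>
        rw [pvRunWhileAGo, pvRunWhileAGo, if_pos hc, if_pos hc]
        exact ih f2 (i + 1) _ _ (by omega) (by omega)
    · cases f2 with
      | zero => rw [pvRunWhileAGo, pvRunWhileAGo, if_neg hc]
      | succ f2 => rw [pvRunWhileAGo, pvRunWhileAGo, if_neg hc, if_neg hc]

theorem pvRunWhileA_eq (words : List String) (i : Nat) (flags : List Bool) (acc : List String) :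
    pvRunWhileA words i flags acc =
      if i < words.length ∧ pvIsSD (words.getD i "") then
        pvRunWhileA words (i + 1) (flags.set i true) (acc ++ [words.getD i ""])
      else (i, flags, acc) := by
  unfold pvRunWhileA
  by_cases hc : i < words.length ∧ pvIsSD (words.getD i "") = true
  · rw [if_pos hc]
    have h1 : words.length - i = (words.length - i - 1) + 1 := by omega
    rw [h1, pvRunWhileAGo, if_pos hc]
    exact pvRunWhileAGo_irrel words (words.length - i - 1) (words.length - (i + 1)) (i + 1) _ _
      (by omega) (by omega)
  · rw [if_neg hc]
    cases hn : words.length - i with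
    | zero => rfl
    | succ f => rw [pvRunWhileAGo, if_neg hc]

theorem pvRunWhileA_fst (words : List String) (i : Nat) (flags : List Bool) (acc : List String) :
    (pvRunWhileA words i flags acc).1 = pvScanEnd words i := by
  unfold pvRunWhileA pvScanEnd
  generalize hf : words.length - i = f
  induction f generalizing i flags acc with
  | zero => rw [pvRunWhileAGo, pvScanEndGo]
  | succ f ih =>
    rw [pvRunWhileAGo, pvScanEndGo]
    split_ifs with hc
    · exact ih (i + 1) _ _ (by omega)
    · rfl

theorem pvRunWhileA_len (words : List String) (i : Nat) (flags : List Bool) (acc : List String) :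
    (pvRunWhileA words i flags acc).2.1.length = flags.length := by
  unfold pvRunWhileA
  generalize hf : words.length - i = f
  induction f generalizing i flags acc with
  | zero => rw [pvRunWhileAGo]
  | succ f ih =>
    rw [pvRunWhileAGo]
    split_ifs with hc
    · rw [ih (i + 1) _ _ (by omega)]
      simp
    · rfl

theorem pvRunWhileA_flags (words : List String) (i : Nat) (flags : List Bool) (acc : List String)
    (hlen : flags.length = words.length) (j : Nat) :
    (pvRunWhileA words i flags acc).2.1.getD j false =
      if i ≤ j ∧ j < pvScanEnd words i then true else flags.getD j false := by
  rw [pvRunWhileA_eq]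
  by_cases hc : i < words.length ∧ pvIsSD (words.getD i "") = true
  · rw [if_pos hc]
    rw [pvRunWhileA_flags words (i + 1) _ _ (by simpa using hlen) j]
    conv_rhs => rw [pvScanEnd_eq]
    rw [if_pos hc]
    have hge := pvScanEnd_ge words (i + 1)
    by_cases hij : i = j
    · subst hij
      split_ifs with h1 h2 h3 <;> try rfl
      all_goals try omega
      · rw [List.getD_eq_getElem?_getD, List.getElem?_set_self (by omega)]
        simp
    · have hne : (flags.set i true).getD j false = flags.getD j false := by
        rw [List.getD_eq_getElem?_getD, List.getElem?_set_ne (by omega), ← List.getD_eq_getElem?_getD]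
      rw [hne]
      split_ifs <;> first | rfl | omega
  · rw [if_neg hc]
    conv_rhs => rw [pvScanEnd_eq]
    rw [if_neg hc]
    simp only []
    split_ifs with h1 <;> first | omega | rfl
termination_by words.length - i
decreasing_by omega

theorem pvLoopA_eq_step (words : List String) (index : Nat) (flags : List Bool)
    (text : String) (sel : List (List String)) :
    pvLoopA words index flags text sel =
      if index < words.length then
        if pvIsSD (words.getD index "") && !(flags.getD index false) then
          let r := pvRunWhileA words index flags []
          let text' := PySem.Str.replace text
            (PySem.Str.join " " (PySem.List.slice words (some (index : Int)) (some ((r.1 - 1 + 1 : Nat) : Int))))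
            (PySem.Str.join "" (PySem.List.slice words (some (index : Int)) (some ((r.1 - 1 + 1 : Nat) : Int))))
          if r.1 = words.length then text'
          else pvLoopA words (index + 1) r.2.1 text' (sel ++ [r.2.2])
        else pvLoopA words (index + 1) flags text sel
      else text := by
  unfold pvLoopA
  by_cases h : index < words.length
  · rw [if_pos h]
    have h1 : words.length - index = (words.length - index - 1) + 1 := by omega
    rw [h1, pvLoopAGo, if_pos h]
    by_cases hg : (pvIsSD (words.getD index "") && !(flags.getD index false)) = true
    · rw [if_pos hg, if_pos hg]
      simp only []
      by_cases hend : (pvRunWhileA words index flags []).1 = words.length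
      · rw [if_pos hend, if_pos hend]
      · rw [if_neg hend, if_neg hend]
        have : ∀ fl tx se, pvLoopAGo words (words.length - index - 1) (index + 1) fl tx se =
            pvLoopAGo words (words.length - (index + 1)) (index + 1) fl tx se := by
          intro fl tx se
          have h2 : words.length - index - 1 = words.length - (index + 1) := by omega
          rw [h2]
        exact this _ _ _
    · rw [if_neg hg, if_neg hg]
      have h2 : words.length - index - 1 = words.length - (index + 1) := by omega
      rw [h2]
  · rw [if_neg h]
    cases hn : words.length - index with
    | zero => rfl
    | succ f => rw [pvLoopAGo, if_neg h]

-- ===== B-side lemmas =====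

-- accumulating a block of single-digit words just extends the pending run
theorem pvBStep_digits (ds : List String) (hd : ∀ w ∈ ds, pvIsSD w = true) :
    ∀ (rest : List String) (s : String) (run : List String),
    (ds ++ rest).foldl pvBStep (s, run) = rest.foldl pvBStep (s, run ++ ds) := by
  induction ds with
  | nil => intro rest s run; simp
  | cons d ds ih =>
    intro rest s run
    have hdd : pvIsSD d = true := hd d (by simp)
    simp only [List.cons_append, List.foldl_cons, pvBStep, hdd, if_pos]
    rw [ih (fun w hw => hd w (by simp [hw])) rest s (run ++ [d])]
    simp

theorem pvRepl_nil (s : String) : pvRepl s [] = s := by simp [pvRepl]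

-- skipping a non-digit word with an empty pending run
theorem pvBRun_skip (words : List String) (f : Nat) (s : String)
    (hf : f < words.length) (hd : pvIsSD (words.getD f "") = false) :
    pvBRun (words.drop f) s = pvBRun (words.drop (f + 1)) s := by
  have hcons : words.drop f = words.getD f "" :: words.drop (f + 1) := by
    rw [List.getD_eq_getElem?_getD, List.getElem?_eq_getElem hf]
    exact List.drop_eq_getElem_cons hf
  have hd' : pvIsSD (words[f]?.getD "") = false := by
    rwa [List.getD_eq_getElem?_getD] at hd
  rw [hcons]
  simp [pvBRun, pvBStep, hd', pvRepl_nil]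

-- consuming a whole run: B replaces it when the run closes (or at the final flush)
theorem pvBRun_run (words : List String) (f : Nat) (s : String)
    (hf : f < words.length) (hd : pvIsSD (words.getD f "") = true) :
    pvBRun (words.drop f) s =
      pvBRun (words.drop (pvScanEnd words f))
        (PySem.Str.replace s
          (PySem.Str.join " " (PySem.List.slice words (some (f : Int)) (some ((pvScanEnd words f : Nat) : Int))))
          (PySem.Str.join "" (PySem.List.slice words (some (f : Int)) (some ((pvScanEnd words f : Nat) : Int))))) := by
  set e := pvScanEnd words f with he
  have hgt : f < e := pvScanEnd_gt words f hf hd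
  have hle : e ≤ words.length := pvScanEnd_le words f (by omega)
  set R := (words.drop f).take (e - f) with hR
  have hslice : PySem.List.slice words (some (f : Int)) (some ((e : Nat) : Int)) = R := by
    rw [hR]; exact PySem.List.slice_natCast words f e
  have hdd : (words.drop f).drop (e - f) = words.drop e := by
    rw [List.drop_drop]; congr 1; omega
  have hsplit : words.drop f = R ++ words.drop e := by
    rw [hR, ← hdd]; exact (List.take_append_drop _ _).symm
  have hRlen : R.length = e - f := by
    rw [hR, List.length_take, List.length_drop]; omega
  have hRne : R.isEmpty = false := by
    cases hR0 : R with
    | nil => rw [hR0] at hRlen; simp at hRlen; omega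
    | cons a t => rfl
  have hRd : ∀ w ∈ R, pvIsSD w = true := by
    intro w hw
    rw [hR] at hw
    rcases List.mem_iff_getElem.mp hw with ⟨k, hk, rfl⟩
    simp only [List.getElem_take, List.getElem_drop]
    have hk1 : k < e - f := by
      have := hk
      simp [List.length_take, List.length_drop] at this
      omega
    have hk2 : f + k < words.length := by
      have := hk
      simp [List.length_take, List.length_drop] at this
      omega
    have := pvScanEnd_dig words f (f + k) (by omega) (by rw [← he]; omega)
    rwa [List.getD_eq_getElem?_getD, List.getElem?_eq_getElem hk2] at this
  unfold pvBRun
  rw [hslice, hsplit, pvBStep_digits R hRd]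
  simp only [List.nil_append]
  have hstop := pvScanEnd_stop words f
  rw [← he] at hstop
  cases hdrop : words.drop e with
  | nil => simp [pvRepl, hRne]
  | cons w rest =>
    have he' : e < words.length := by
      by_contra h
      have h0 : words.drop e = [] := List.drop_eq_nil_of_le (by omega)
      rw [hdrop] at h0; simp at h0
    have hwe : w = words.getD e "" := by
      have h1 := List.drop_eq_getElem_cons he'
      rw [hdrop] at h1
      rw [List.getD_eq_getElem?_getD, List.getElem?_eq_getElem he']
      exact ((List.cons_eq_cons.mp h1).1)
    have hwF : pvIsSD w = false := by
      rw [hwe]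
      cases hvv : pvIsSD (words.getD e "") with
      | false => rfl
      | true => exact absurd ⟨he', hvv⟩ hstop
    simp [pvBStep, hwF, pvRepl, hRne]

theorem pvInitFlags (words : List String) (j : Nat) :
    (words.map (fun _ => false)).getD j false = false := by
  rw [List.getD_eq_getElem?_getD, List.getElem?_map]
  cases words[j]? <;> rfl

-- the main invariant: A's loop from index i with flags marking exactly the digit words
-- below the frontier f equals B's fold-and-flush over the words from f
theorem pvLoopA_invariant (words : List String) :
    ∀ n i f flags text sel, words.length - i ≤ n →
    flags.length = words.length → i ≤ f → f ≤ words.length →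
    (∀ j, flags.getD j false = (decide (j < f) && pvIsSD (words.getD j ""))) →
    (∀ k, i ≤ k → k < f → pvIsSD (words.getD k "") = true) →
    pvLoopA words i flags text sel = pvBRun (words.drop f) text := by
  intro n
  induction n with
  | zero =>
    intro i f flags text sel hn hlen hif hfl hflags hdig
    have hf : f = words.length := by omega
    rw [pvLoopA_eq_step, if_neg (by omega : ¬ i < words.length), hf]
    simp [pvBRun, pvRepl_nil]
  | succ n ih =>
    intro i f flags text sel hn hlen hif hfl hflags hdig
    by_cases hi : i < words.length
    · rw [pvLoopA_eq_step, if_pos hi]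
      by_cases hd : pvIsSD (words.getD i "") = true
      · by_cases hif' : i < f
        · have hflag : flags.getD i false = true := by
            rw [hflags i, hd]; simp [hif']
          rw [hd, hflag]
          simp only [Bool.not_true, Bool.and_false, Bool.false_eq_true, if_false]
          exact ih (i + 1) f flags text sel (by omega) hlen (by omega) hfl hflags
            (fun k hk1 hk2 => hdig k (by omega) hk2)
        · have hfi : f = i := by omega
          subst hfi
          have hflag : flags.getD f false = false := by rw [hflags f]; simp
          rw [hd, hflag]
          simp only [Bool.not_false, Bool.and_true, if_true]
          rw [pvRunWhileA_fst words f flags []]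
          set e := pvScanEnd words f with he
          have hgt : f < e := pvScanEnd_gt words f hi hd
          have hle : e ≤ words.length := pvScanEnd_le words f (by omega)
          have hsub : e - 1 + 1 = e := by omega
          rw [pvBRun_run words f text hi hd, ← he]
          simp only [hsub]
          by_cases hend : e = words.length
          · rw [if_pos hend, hend]
            simp [pvBRun, pvRepl_nil]
          · rw [if_neg hend]
            apply ih (f + 1) e _ _ _ (by omega) (by rw [pvRunWhileA_len]; exact hlen)
              (by omega) hle
            · intro j
              rw [pvRunWhileA_flags words f flags [] hlen j, ← he]
              by_cases h1 : f ≤ j ∧ j < e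
              · rw [if_pos h1]
                have hdj := pvScanEnd_dig words f j h1.1 (by rw [← he]; exact h1.2)
                rw [hdj]
                simp [h1.2]
              · rw [if_neg h1, hflags j]
                by_cases h2 : j < f
                · simp [h2, show j < e by omega]
                · simp [h2, show ¬ j < e by omega]
            · intro k hk1 hk2
              exact pvScanEnd_dig words f k (by omega) (by rw [← he]; exact hk2)
      · have hfi : f = i := by
          by_contra hne
          exact hd (hdig i (by omega) (by omega))
        subst hfi
        have hb : pvIsSD (words.getD f "") = false := by simpa using hd
        rw [hb]
        simp only [Bool.false_and, Bool.false_eq_true, if_false]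
        rw [pvBRun_skip words f text hi hb]
        apply ih (f + 1) (f + 1) flags text sel (by omega) hlen (by omega) (by omega)
        · intro j
          rw [hflags j]
          by_cases hj : j = f
          · subst hj; rw [hb]; simp
          · by_cases h2 : j < f
            · simp [h2, show j < f + 1 by omega]
            · simp [show ¬ j < f by omega, show ¬ j < f + 1 by omega]
        · intro k hk1 hk2
          omega
    · rw [pvLoopA_eq_step, if_neg hi]
      have hf : f = words.length := by omega
      rw [hf]
      simp [pvBRun, pvRepl_nil]

-- ===== VERDICT (by name: the statement is the Claim_ definition above) =====
theorem combineSeparatedNumber_spec : Claim_equal_combineSeparatedNumber := by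
  intro text _
  unfold Spec_combineSeparatedNumber
  simp only [combineSeparatedNumber, combineSeparatedNumber_alt]
  rw [pvLoopA_invariant (PySem.Str.split₀ text) (PySem.Str.split₀ text).length 0 0 _ text []
    (by omega) (by rw [List.length_map]) (by omega) (by omega)
    (fun j => by rw [pvInitFlags]; simp)
    (fun k hk1 hk2 => by omega)]
  simp [pvBRun]
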